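-- pv_equiv track=rewrite | github.com/zkangHUST/LeetCodeSolution | Python/1170.py | f
-- ===== SOURCE A (Python) =====
-- def f(s):
--     m = 'z'
--     ans = 0
--     for c in s:
--         if c <= m:
--             ans = s.count(c)
--             m = c
--     return ans
-- ===== SOURCE B (Python) =====
-- def f(s):
--     eligible = [c for c in s if c <= 'z']
--     if not eligible:
--         return 0
--     return s.count(min(eligible))
-- ===== Notes on version B (the rewrite author's own statement) =====
-- stated objective: faster
-- what changed: A rescans the whole string with s.count on every running-min update (O(n^2)); B observes that the last update is always by the minimum character <= 'z', so it filters once, takes min once, and counts once (O(n)).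
import Mathlib
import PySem

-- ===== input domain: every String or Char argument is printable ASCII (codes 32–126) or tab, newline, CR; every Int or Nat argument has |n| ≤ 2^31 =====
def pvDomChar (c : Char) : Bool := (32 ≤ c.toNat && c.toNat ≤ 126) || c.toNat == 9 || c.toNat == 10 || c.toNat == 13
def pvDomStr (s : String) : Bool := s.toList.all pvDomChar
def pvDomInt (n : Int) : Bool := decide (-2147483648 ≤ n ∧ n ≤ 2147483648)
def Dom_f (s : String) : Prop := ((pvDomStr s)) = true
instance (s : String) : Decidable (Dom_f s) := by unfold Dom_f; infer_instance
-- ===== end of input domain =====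

-- B replaces A's quadratic rescan-on-every-update loop by: filter chars <= 'z', take their min, count it once (O(n)).


-- ===== PORT A =====
def f (s : String) : Int :=
  (s.toList.foldl (fun (st : Char × Int) c =>
      if c ≤ st.1 then (c, (PySem.Str.count s (String.mk [c]) : Int)) else st)
    ('z', 0)).2

-- ===== PORT B =====
def f_alt (s : String) : Int :=
  let eligible := s.toList.filter (fun c => c ≤ 'z')
  match PySem.List.min? eligible (fun y => y) with
  | none => 0
  | some mn => (PySem.Str.count s (String.mk [mn]) : Int)

-- ===== PRECONDITION & SPEC =====
def Spec_f (s : String) (out : Int) : Prop := out = f_alt s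
instance (s : String) (out : Int) : Decidable (Spec_f s out) := by unfold Spec_f; infer_instance

-- ===== CLAIM (what is proved, stated in full; the proofs are below) =====
def Claim_equal_f : Prop := ∀ (s : String), Dom_f s → Spec_f s (f s)

-- ===== LEMMAS AND PROOFS =====

-- if nothing in l is ≤ c, the running min stays c
theorem pv_foldl_min_stays (l : List Char) (c : Char)
    (h : ∀ d ∈ l, ¬ d ≤ c) : l.foldl min c = c := by
  induction l with
  | nil => rfl
  | cons d t ih =>
    have hd : ¬ d ≤ c := h d (by simp)
    have : min c d = c := min_eq_left (le_of_not_ge hd)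
    simpa [List.foldl, this] using ih (fun e he => h e (by simp [he]))

-- characterisation of A's loop: final state = (running min, count of the final min if any update fired)
theorem pv_foldA (l : List Char) (cnt : Char → Int) :
    ∀ (m : Char) (a : Int),
      l.foldl (fun (st : Char × Int) c => if c ≤ st.1 then (c, cnt c) else st) (m, a)
        = (l.foldl min m,
           if l.any (fun c => c ≤ m) then cnt (l.foldl min m) else a) := by
  induction l with
  | nil => intro m a; simp
  | cons c t ih =>
    intro m a
    by_cases hc : c ≤ m
    · have hmc : min m c = c := min_eq_right hc
      by_cases ht : t.any (fun d => d ≤ c)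
      · simp [List.foldl, hc, ih c (cnt c), ht]
      · have hno : ∀ d ∈ t, ¬ d ≤ c := by
          intro d hd
          simp [List.any_eq_true] at ht
          exact not_le_of_gt (ht d hd)
        simp [List.foldl, hc, ih c (cnt c), ht, pv_foldl_min_stays t c hno]
    · have hmc : min m c = m := min_eq_left (le_of_not_ge hc)
      simp [List.foldl, hc, hmc, ih m a]

-- dropping elements above the initial bound does not change a running min started at m' ≤ m
theorem pv_foldl_min_filter (l : List Char) (m : Char) :
    ∀ (m' : Char), m' ≤ m →
      l.foldl min m' = (l.filter (fun c => c ≤ m)).foldl min m' := by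
  induction l with
  | nil => intro m' _; rfl
  | cons c t ih =>
    intro m' hm'
    by_cases hc : c ≤ m
    · simpa [List.foldl, hc] using ih (min m' c) (le_trans (min_le_left _ _) hm')
    · have : min m' c = m' := min_eq_left (le_trans hm' (le_of_not_ge hc))
      simpa [List.foldl, hc, this] using ih m' hm'

-- ===== VERDICT (by name: the statement is the Claim_ definition above) =====
theorem f_spec : Claim_equal_f := by
  intro s _
  unfold Spec_f f f_alt
  set l := s.toList with hl
  rw [pv_foldA l (fun c => (PySem.Str.count s (String.mk [c]) : Int)) 'z' 0]
  by_cases h : l.any (fun c => c ≤ 'z')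
  · -- some eligible character exists
    obtain ⟨e, t, he⟩ : ∃ e t, l.filter (fun c => c ≤ 'z') = e :: t := by
      rcases hE : l.filter (fun c => c ≤ 'z') with _ | ⟨e, t⟩
      · exfalso
        rw [List.any_eq_true] at h
        obtain ⟨c, hc, hcz⟩ := h
        have : c ∈ l.filter (fun c => c ≤ 'z') := by
          simp [List.mem_filter, hc, hcz]
        simp [hE] at this
      · exact ⟨e, t, rfl⟩
    have hez : e ≤ 'z' := by
      have : e ∈ l.filter (fun c => c ≤ 'z') := by simp [he]
      simpa using (List.mem_filter.mp this).2
    have hmin : l.foldl min 'z' = t.foldl min e := by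
      rw [pv_foldl_min_filter l 'z' 'z' le_rfl, he]
      simp [List.foldl, min_eq_right hez]
    simp [he, PySem.List.min?_id_cons, h, hmin]
  · -- no eligible character: filter is empty, A never updates
    have hE : l.filter (fun c => c ≤ 'z') = [] := by
      rw [List.filter_eq_nil_iff]
      intro c hc
      rw [List.any_eq_true] at h
      intro hcz
      exact h ⟨c, hc, by simpa using hcz⟩
    simp [hE, PySem.List.min?, h]
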